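-- pv_equiv track=rewrite | github.com/madina111111/WEBDEV | lab7/CodingBat/Logic2/lucky_sum.py | lucky_sum
-- ===== SOURCE A (Python) =====
-- def lucky_sum(a, b, c):
--     total = 0
--
--     for n in (a, b, c):
--         if n != 13:
--             total += n
--         else:
--             break
--
--     return total
-- ===== SOURCE B (Python) =====
-- def lucky_sum(a, b, c):
--     xs = [a, b, c]
--     if 13 in xs:
--         return sum(xs[:xs.index(13)])
--     return sum(xs)
-- ===== Notes on version B (the rewrite author's own statement) =====
-- stated objective: alternative
-- what changed: Instead of accumulating in a loop with break, B first locates the first 13 with list.index and then sums the slice of the list before it (staged find-then-sum instead of a single guarded accumulation).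
import Mathlib
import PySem

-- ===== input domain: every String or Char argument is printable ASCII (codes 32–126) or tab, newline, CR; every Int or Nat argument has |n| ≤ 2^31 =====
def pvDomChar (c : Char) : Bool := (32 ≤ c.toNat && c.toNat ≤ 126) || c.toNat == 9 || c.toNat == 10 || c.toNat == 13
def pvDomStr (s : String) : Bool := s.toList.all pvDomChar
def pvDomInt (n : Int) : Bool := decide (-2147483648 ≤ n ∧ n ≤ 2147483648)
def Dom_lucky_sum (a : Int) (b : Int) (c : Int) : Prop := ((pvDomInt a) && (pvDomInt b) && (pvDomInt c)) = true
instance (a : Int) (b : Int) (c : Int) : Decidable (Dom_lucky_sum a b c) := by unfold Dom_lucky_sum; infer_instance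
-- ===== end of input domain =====

-- B finds the first 13 with list.index and sums the slice before it, instead of A's accumulator loop with break (alternative decomposition).
-- ===== PORT A =====
-- loop 'for n in (a,b,c): if n != 13: total += n else break' as structural recursion over the list
def luckyLoop : List Int → Int → Int
  | [], total => total
  | n :: rest, total => if n ≠ 13 then luckyLoop rest (total + n) else total

def lucky_sum (a : Int) (b : Int) (c : Int) : Int := luckyLoop [a, b, c] 0

-- ===== PORT B =====
-- xs = [a,b,c]; if 13 in xs: return sum(xs[:xs.index(13)]); return sum(xs)
def lucky_sum_alt (a : Int) (b : Int) (c : Int) : Int :=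
  let xs : List Int := [a, b, c]
  if xs.contains 13 then
    match PySem.List.index? xs 13 with
    | some i => (PySem.List.slice xs none (some (i : Int))).sum
    | none => xs.sum   -- unreachable: 13 ∈ xs
  else xs.sum

-- ===== PRECONDITION & SPEC =====
def Spec_lucky_sum (a : Int) (b : Int) (c : Int) (out : Int) : Prop := out = lucky_sum_alt a b c
instance (a : Int) (b : Int) (c : Int) (out : Int) : Decidable (Spec_lucky_sum a b c out) := by unfold Spec_lucky_sum; infer_instance

-- ===== CLAIM =====
def Claim_equal_lucky_sum : Prop := ∀ (a : Int) (b : Int) (c : Int), Dom_lucky_sum a b c → Spec_lucky_sum a b c (lucky_sum a b c)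

-- ===== LEMMAS AND PROOFS =====

-- ===== VERDICT =====
theorem lucky_sum_spec : Claim_equal_lucky_sum := by
  intro a b c _
  by_cases ha : a = 13 <;> by_cases hb : b = 13 <;> by_cases hc : c = 13 <;>
    simp [Spec_lucky_sum, lucky_sum, lucky_sum_alt, luckyLoop, ha, hb, hc,
      List.idxOf?, List.findIdx?, List.findIdx?.go, PySem.List.index?,
      PySem.List.slice, PySem.List.clampIdx] <;> omega
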